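-- pv_equiv track=rewrite | github.com/YagoRizzetti/AlgoritmosYEstructurasDeDatos1 | SegundoParcial/Practicaparcial2/funcionesPracticaParcial.py | ultimaL
-- ===== SOURCE A (Python) =====
-- def ultimaL(a):
--     newp = False
--     ultima = ""
--     countpla = 0
--
--     for i in a:
--         if i == " " or i == ".":
--             newp = True
--         else:
--             if newp and ultima == i:
--                 countpla += 1
--             ultima = i
--             newp = False
--     return countpla
-- ===== SOURCE B (Python) =====
-- def ultimaL(a):
--     # tokenize into words (maximal runs of chars other than ' ' and '.'),
--     # then count adjacent pairs where the next word starts with the char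
--     # that ended the previous word
--     words = []
--     cur = ""
--     for ch in a:
--         if ch == " " or ch == ".":
--             if cur:
--                 words.append(cur)
--             cur = ""
--         else:
--             cur += ch
--     if cur:
--         words.append(cur)
--     return sum(1 for u, v in zip(words, words[1:]) if u[-1] == v[0])
-- ===== Notes on version B (the rewrite author's own statement) =====
-- stated objective: simpler
-- what changed: Replaces A's one-pass state machine (newp flag + last-char register) by a two-phase decomposition: tokenize into words on ' '/'.' separators, then count adjacent word pairs where the next word's first char equals the previous word's last char.
import Mathlib
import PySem

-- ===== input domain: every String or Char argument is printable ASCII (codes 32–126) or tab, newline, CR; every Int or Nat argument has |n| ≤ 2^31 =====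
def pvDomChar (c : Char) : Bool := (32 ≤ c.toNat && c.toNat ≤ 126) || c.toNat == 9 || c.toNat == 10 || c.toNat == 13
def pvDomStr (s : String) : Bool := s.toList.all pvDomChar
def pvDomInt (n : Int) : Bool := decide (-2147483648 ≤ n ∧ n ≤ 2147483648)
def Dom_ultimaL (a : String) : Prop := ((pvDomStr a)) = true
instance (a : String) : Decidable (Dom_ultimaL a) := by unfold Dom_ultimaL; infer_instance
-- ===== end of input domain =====

-- B replaces A's one-pass flag/last-char state machine by tokenize-then-count-adjacent-pairs (simpler decomposition, same O(n) cost).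

-- ===== PORT A =====
-- A's 'ultima' is a Python string holding "" or one char; ported as a List Char ([] or [c]).
def ultimaL (a : String) : Int :=
  let st := a.toList.foldl (fun (st : Bool × List Char × Int) i =>
    if i == ' ' || i == '.' then (true, st.2.1, st.2.2)
    else if st.1 && st.2.1 == [i] then (false, [i], st.2.2 + 1)
    else (false, [i], st.2.2)) (false, [], 0)
  st.2.2

-- ===== PORT B =====
-- B's loop state: (words so far, current word); both Python strings/lists ported as lists.
def pvStepB (st : List (List Char) × List Char) (ch : Char) : List (List Char) × List Char :=
  if ch == ' ' || ch == '.' then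
    (if st.2.isEmpty then st.1 else st.1 ++ [st.2], [])
  else (st.1, st.2 ++ [ch])

def ultimaL_alt (a : String) : Int :=
  let st := a.toList.foldl pvStepB ([], [])
  let words := if st.2.isEmpty then st.1 else st.1 ++ [st.2]
  ((words.zip (words.drop 1)).map
    (fun p => if PySem.List.pyGet? p.1 (-1) = PySem.List.pyGet? p.2 0 then (1 : Int) else 0)).sum

-- ===== PRECONDITION & SPEC =====
def Spec_ultimaL (a : String) (out : Int) : Prop := out = ultimaL_alt a
instance (a : String) (out : Int) : Decidable (Spec_ultimaL a out) := by unfold Spec_ultimaL; infer_instance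

-- ===== CLAIM (what is proved, stated in full; the proofs are below) =====
def Claim_equal_ultimaL : Prop := ∀ (a : String), Dom_ultimaL a → Spec_ultimaL a (ultimaL a)

-- ===== LEMMAS AND PROOFS =====

-- A's loop, rewritten as a recursion (newp, ultima, rest) ↦ count added from rest.
def gA : Bool → List Char → List Char → Int
  | _, _, [] => 0
  | newp, u, c :: cs =>
    if c == ' ' || c == '.' then gA true u cs
    else (if newp && u == [c] then 1 else 0) + gA false [c] cs

-- pair count over a word list, threading the previous word's last char.
def cp : Option Char → List (List Char) → Int
  | _, [] => 0
  | prev, w :: ws => (if prev = w.head? then 1 else 0) + cp w.getLast? ws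

-- recursive tokenizer equivalent to B's loop.
def pvTok : List Char → List Char → List (List Char)
  | [], cur => if cur.isEmpty then [] else [cur]
  | c :: cs, cur =>
    if c == ' ' || c == '.' then
      (if cur.isEmpty then pvTok cs [] else cur :: pvTok cs [])
    else pvTok cs (cur ++ [c])

-- B's final word list, as a function of the loop state.
def pvFin (st : List (List Char) × List Char) : List (List Char) :=
  if st.2.isEmpty then st.1 else st.1 ++ [st.2]

-- B's zip-sum over a word list.
def pvZ (words : List (List Char)) : Int :=
  ((words.zip (words.drop 1)).map
    (fun p => if PySem.List.pyGet? p.1 (-1) = PySem.List.pyGet? p.2 0 then (1 : Int) else 0)).sum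

lemma none_ne_head (w : List Char) (h : w ≠ []) : ¬ ((none : Option Char) = w.head?) := by
  cases w with
  | nil => exact absurd rfl h
  | cons a t => simp

lemma pyGet_last (w : List Char) (h : w ≠ []) : PySem.List.pyGet? w (-1) = w.getLast? := by
  cases w with
  | nil => exact absurd rfl h
  | cons a t => simp [PySem.List.pyGet?, PySem.List.pyIdx?, List.getLast?_eq_getElem?]

lemma pyGet_head (w : List Char) (h : w ≠ []) : PySem.List.pyGet? w 0 = w.head? := by
  cases w with
  | nil => exact absurd rfl h
  | cons a t => simp [PySem.List.pyGet?, PySem.List.pyIdx?]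

lemma foldlA (cs : List Char) : ∀ (newp : Bool) (u : List Char) (c : Int),
    (cs.foldl (fun (st : Bool × List Char × Int) i =>
      if i == ' ' || i == '.' then (true, st.2.1, st.2.2)
      else if st.1 && st.2.1 == [i] then (false, [i], st.2.2 + 1)
      else (false, [i], st.2.2)) (newp, u, c)).2.2 = c + gA newp u cs := by
  induction cs with
  | nil => intro newp u c; simp [gA]
  | cons x xs ih =>
    intro newp u c
    by_cases hx : (x == ' ' || x == '.') = true
    · simp only [List.foldl_cons, gA, hx, if_true]
      exact ih true u c
    · simp only [List.foldl_cons, gA, hx, if_false, Bool.false_eq_true]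
      by_cases hc : (newp && u == [x]) = true
      · simp only [hc, if_true]
        rw [ih]
        ring
      · simp only [hc, if_false, Bool.false_eq_true]
        rw [ih]
        ring

lemma foldlB (cs : List Char) : ∀ (acc : List (List Char)) (cur : List Char),
    pvFin (cs.foldl pvStepB (acc, cur)) = acc ++ pvTok cs cur := by
  induction cs with
  | nil =>
    intro acc cur
    by_cases h : cur.isEmpty = true <;> simp [pvFin, pvTok, h]
  | cons x xs ih =>
    intro acc cur
    simp only [List.foldl_cons, pvStepB, pvTok]
    by_cases hx : (x == ' ' || x == '.') = true
    · by_cases hc : cur.isEmpty = true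
      · simp only [hx, hc, if_true]
        exact ih acc []
      · simp only [hx, hc, if_true, if_false, Bool.false_eq_true]
        rw [ih]
        simp
    · simp only [hx, if_false, Bool.false_eq_true]
      exact ih acc (cur ++ [x])

lemma tok_nonempty (cs : List Char) : ∀ (cur : List Char), ∀ w ∈ pvTok cs cur, w ≠ [] := by
  induction cs with
  | nil =>
    intro cur w hw
    by_cases h : cur.isEmpty = true <;> simp [pvTok, h] at hw
    · subst hw; simpa [List.isEmpty_iff] using h
  | cons x xs ih =>
    intro cur w hw
    simp only [pvTok] at hw
    by_cases hx : (x == ' ' || x == '.') = true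
    · by_cases hc : cur.isEmpty = true
      · exact ih [] w (by simpa [hx, hc] using hw)
      · simp only [hx, hc, if_true, if_false, Bool.false_eq_true, List.mem_cons] at hw
        rcases hw with rfl | hw
        · simpa [List.isEmpty_iff] using hc
        · exact ih [] w hw
    · exact ih (cur ++ [x]) w (by simpa [hx] using hw)

lemma tok_head (cs : List Char) : ∀ (cur : List Char), cur ≠ [] →
    ∃ e ws, pvTok cs cur = (cur ++ e) :: ws := by
  induction cs with
  | nil =>
    intro cur h
    exact ⟨[], [], by simp [pvTok, List.isEmpty_iff, h]⟩
  | cons x xs ih =>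
    intro cur h
    simp only [pvTok]
    by_cases hx : (x == ' ' || x == '.') = true
    · exact ⟨[], pvTok xs [], by simp [hx, List.isEmpty_iff, h]⟩
    · obtain ⟨e, ws, he⟩ := ih (cur ++ [x]) (by simp)
      exact ⟨[x] ++ e, ws, by simp [hx, he]⟩

lemma gA_nil_flag (cs : List Char) : gA false [] cs = gA true [] cs := by
  cases cs with
  | nil => rfl
  | cons x xs =>
    simp only [gA]
    by_cases hx : (x == ' ' || x == '.') = true <;> simp [hx]

-- the main invariant: cp over the tokenizer equals A's recursion, for both loop states.
lemma main_inv (cs : List Char) : ∀ (cur : List Char) (prev : Option Char),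
    cp (if cur.isEmpty then prev else none) (pvTok cs cur)
      = gA cur.isEmpty (if cur.isEmpty then prev.toList else (cur.getLast?).toList) cs := by
  induction cs with
  | nil =>
    intro cur prev
    by_cases h : cur.isEmpty = true
    · simp [pvTok, h, cp, gA]
    · have hne : cur ≠ [] := by simpa [List.isEmpty_iff] using h
      simp [pvTok, h, cp, gA, none_ne_head cur hne]
  | cons x xs ih =>
    intro cur prev
    simp only [pvTok, gA]
    by_cases hx : (x == ' ' || x == '.') = true
    · simp only [hx, if_true]
      by_cases hc : cur.isEmpty = true
      · have := ih [] prev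
        simpa [hc] using this
      · have hne : cur ≠ [] := by simpa [List.isEmpty_iff] using hc
        have hg := ih [] (cur.getLast?)
        simp only [List.isEmpty_nil, if_true] at hg
        simp only [hc, if_false, Bool.false_eq_true, cp]
        rw [hg]
        simp [none_ne_head cur hne]
    · simp only [hx, if_false, Bool.false_eq_true]
      by_cases hc : cur.isEmpty = true
      · have hcur : cur = [] := by simpa [List.isEmpty_iff] using hc
        subst hcur
        obtain ⟨e, ws, he⟩ := tok_head xs [x] (by simp)
        have hg := ih [x] prev
        simp only [List.nil_append]
        rw [he] at hg ⊢
        simp only [show ([x] : List Char).isEmpty = false from rfl, Bool.false_eq_true,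
          if_false, cp] at hg
        simp only [List.isEmpty_nil, if_true, cp, List.singleton_append, List.head?_cons]
        simp only [List.singleton_append, List.head?_cons] at hg
        rw [if_neg (by simp), zero_add] at hg
        simp only [show ([x] : List Char).getLast?.toList = [x] from rfl] at hg
        rw [hg]
        cases prev with
        | none => simp
        | some p =>
          by_cases hp : p = x <;> simp [hp]
      · have hne : cur ≠ [] := by simpa [List.isEmpty_iff] using hc
        have hg := ih (cur ++ [x]) prev
        have hne2 : (cur ++ [x]).isEmpty = false := by simp
        rw [hne2] at hg
        simp only [Bool.false_eq_true, if_false] at hg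
        simp only [hc, if_false, Bool.false_eq_true]
        rw [hg]
        simp [List.getLast?_append]

-- B's zip-sum equals cp none on a list of nonempty words.
lemma zip_cp : ∀ (ws : List (List Char)), (∀ w ∈ ws, w ≠ []) → pvZ ws = cp none ws := by
  intro ws
  induction ws with
  | nil => intro _; simp [pvZ, cp]
  | cons w vs ih =>
    intro hne
    have hw : w ≠ [] := hne w (by simp)
    cases vs with
    | nil => simp [pvZ, cp, none_ne_head w hw]
    | cons v r =>
      have hv : v ≠ [] := hne v (by simp)
      have hrec := ih (fun u hu => hne u (List.mem_cons_of_mem _ hu))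
      simp only [pvZ, List.drop_succ_cons, List.drop_zero, List.zip_cons_cons, List.map_cons,
        List.sum_cons, cp] at hrec ⊢
      rw [hrec]
      rw [pyGet_last w hw, pyGet_head v hv]
      simp [none_ne_head w hw, none_ne_head v hv]

-- ===== VERDICT (by name: the statement is the Claim_ definition above) =====
theorem ultimaL_spec : Claim_equal_ultimaL := by
  intro a _
  show ultimaL a = ultimaL_alt a
  have hA : ultimaL a = gA false [] a.toList := by
    show (a.toList.foldl _ (false, [], 0)).2.2 = _
    rw [foldlA a.toList false [] 0]
    ring
  have hB : ultimaL_alt a = pvZ (pvFin (a.toList.foldl pvStepB ([], []))) := rfl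
  rw [hA, hB, foldlB a.toList [] []]
  simp only [List.nil_append]
  rw [zip_cp _ (tok_nonempty a.toList [])]
  have := main_inv a.toList [] none
  simp only [List.isEmpty_nil, if_true, Option.toList_none] at this
  rw [this, gA_nil_flag]
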